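-- pv_equiv track=rewrite | github.com/kkr010128/codebert | problem079/problem079_53.py | solve
-- ===== SOURCE A (Python) =====
-- def solve(s):
--     dp = [0]*(s+1)
--     dp[0] = 1
--     MOD = 10**9+7
--     x = 0
--     for i in range(1,s+1):
--         for j in range(0,i-3+1):
--             dp[i] += dp[j]
--             dp[i] %= MOD
--     return dp[s]
-- ===== SOURCE B (Python) =====
-- def solve(s):
--     MOD = 10**9 + 7
--     dp = [0]*(s+1)
--     dp[0] = 1
--     run = 0
--     for i in range(1, s+1):
--         if i >= 3:
--             run = (run + dp[i-3]) % MOD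
--         dp[i] = run
--     return dp[s]
-- ===== Notes on version B (the rewrite author's own statement) =====
-- stated objective: faster
-- what changed: replaces the O(s^2) inner loop that re-sums dp[0..i-3] for every i by a single running prefix sum updated with one addition per i
import Mathlib
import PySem

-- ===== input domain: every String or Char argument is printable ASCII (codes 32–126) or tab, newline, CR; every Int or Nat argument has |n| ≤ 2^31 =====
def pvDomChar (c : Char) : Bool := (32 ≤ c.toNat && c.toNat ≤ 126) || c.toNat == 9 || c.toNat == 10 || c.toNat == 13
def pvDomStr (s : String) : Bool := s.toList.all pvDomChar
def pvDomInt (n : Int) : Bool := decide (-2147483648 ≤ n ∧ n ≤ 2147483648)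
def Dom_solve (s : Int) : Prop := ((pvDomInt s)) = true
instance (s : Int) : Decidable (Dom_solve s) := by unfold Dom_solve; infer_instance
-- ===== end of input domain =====

-- B replaces A's O(s^2) re-summation of dp[0..i-3] at every i by one running prefix sum (objective: faster, asymptotic).

-- ===== PORT A =====
-- one inner-loop body step of A: add dp at j into dp at i, then reduce mod MOD (dp is a Python list = array)
def stepA (M : Int) (i : Int) (dp : Array Int) (j : Int) : Array Int :=
  let dp1 := dp.setIfInBounds i.toNat (dp.getD i.toNat 0 + dp.getD j.toNat 0)
  dp1.setIfInBounds i.toNat (PySem.Int.mod (dp1.getD i.toNat 0) M)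

def solve (s : Int) : Int :=
  let dp0 := (Array.replicate (s+1).toNat (0:Int)).setIfInBounds 0 1
  let M : Int := 10^9 + 7
  let dp := (PySem.List.pyRange 1 (s+1) 1).foldl (fun dp i =>
    (PySem.List.pyRange 0 (i-3+1) 1).foldl (stepA M i) dp) dp0
  dp.getD s.toNat 0

-- ===== PORT B =====
-- one loop-body step of B: update the running prefix sum, then write it into dp at i
def stepB (M : Int) (st : Array Int × Int) (i : Int) : Array Int × Int :=
  let run := if 3 ≤ i then PySem.Int.mod (st.2 + st.1.getD (i-3).toNat 0) M else st.2
  (st.1.setIfInBounds i.toNat run, run)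

def solve_alt (s : Int) : Int :=
  let M : Int := 10^9 + 7
  let dp0 := (Array.replicate (s+1).toNat (0:Int)).setIfInBounds 0 1
  let st := (PySem.List.pyRange 1 (s+1) 1).foldl (stepB M) (dp0, 0)
  st.1.getD s.toNat 0

-- ===== PRECONDITION & SPEC =====
-- Pre_ excludes negative s, where Python A raises IndexError assigning the seed into an empty dp list (B raises there too).
def Pre_solve (s : Int) : Prop := 0 ≤ s
instance (s : Int) : Decidable (Pre_solve s) := by unfold Pre_solve; infer_instance
def pvWitness_solve : Int := 5

def Spec_solve (s : Int) (out : Int) : Prop := out = solve_alt s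
instance (s : Int) (out : Int) : Decidable (Spec_solve s out) := by unfold Spec_solve; infer_instance

-- ===== CLAIM (what is proved, stated in full; the proofs are below) =====
def Claim_equal_solve : Prop := ∀ (s : Int), Dom_solve s → Pre_solve s → Spec_solve s (solve s)

-- ===== LEMMAS AND PROOFS =====

-- the common value: F 0 = 1, F 1 = F 2 = 0, F (n+3) = (F (n+2) + F n) % (10^9+7)
def fF : Nat → Int
  | 0 => 1
  | 1 => 0
  | 2 => 0
  | n+3 => PySem.Int.mod (fF (n+2) + fF n) (10^9 + 7)

theorem fF_succ3 (n : Nat) : fF (n+3) = PySem.Int.mod (fF (n+2) + fF n) (10^9 + 7) := rfl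

-- the dp list once the first k+1 entries are final (length n+1 when k ≤ n)
def dpSpec (n k : Nat) : List Int :=
  ((List.range (k+1)).map fF) ++ List.replicate (n - k) 0

-- list-level mirrors of the two loop bodies (the Array ports act on .toList exactly like these)
def stepAL (M : Int) (i : Int) (dp : List Int) (j : Int) : List Int :=
  let dp1 := dp.set i.toNat (dp.getD i.toNat 0 + dp.getD j.toNat 0)
  dp1.set i.toNat (PySem.Int.mod (dp1.getD i.toNat 0) M)

def stepBL (M : Int) (st : List Int × Int) (i : Int) : List Int × Int :=
  let run := if 3 ≤ i then PySem.Int.mod (st.2 + st.1.getD (i-3).toNat 0) M else st.2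
  (st.1.set i.toNat run, run)

theorem agetD (a : Array Int) (n : Nat) (d : Int) : a.getD n d = a.toList.getD n d := by
  rw [Array.getD_eq_getD_getElem?, List.getD_eq_getElem?_getD, ← Array.getElem?_toList]

theorem stepA_toList (M i : Int) (arr : Array Int) (j : Int) :
    (stepA M i arr j).toList = stepAL M i arr.toList j := by
  dsimp only [stepA, stepAL]
  simp only [Array.toList_setIfInBounds, agetD]

theorem foldA_toList (l : List Int) : ∀ (M i : Int) (arr : Array Int),
    (l.foldl (stepA M i) arr).toList = l.foldl (stepAL M i) arr.toList := by
  induction l with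
  | nil => intro M i arr; rfl
  | cons x xs ih => intro M i arr; rw [List.foldl_cons, List.foldl_cons, ih, stepA_toList]

theorem stepB_toList (M : Int) (st : Array Int × Int) (x : Int) :
    ((stepB M st x).1.toList, (stepB M st x).2) = stepBL M (st.1.toList, st.2) x := by
  dsimp only [stepB, stepBL]
  simp only [Array.toList_setIfInBounds, agetD]

theorem foldB_toList (l : List Int) : ∀ (M : Int) (st : Array Int × Int),
    ((l.foldl (stepB M) st).1.toList, (l.foldl (stepB M) st).2)
      = l.foldl (stepBL M) (st.1.toList, st.2) := by
  induction l with
  | nil => intro M st; rfl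
  | cons x xs ih =>
    intro M st
    rw [List.foldl_cons, List.foldl_cons, ← stepB_toList]
    exact ih M (stepB M st x)

theorem getD_set_self (dp : List Int) (N : Nat) (v : Int) (h : N < dp.length) :
    (dp.set N v).getD N 0 = v := by
  rw [List.getD_eq_getElem?_getD, List.getElem?_set_self h]; rfl

theorem getD_set_ne (dp : List Int) (N m : Nat) (v : Int) (h : N ≠ m) :
    (dp.set N v).getD m 0 = dp.getD m 0 := by
  rw [List.getD_eq_getElem?_getD, List.getElem?_set_ne h, ← List.getD_eq_getElem?_getD]

theorem dpSpec_length (n k : Nat) (hk : k ≤ n) : (dpSpec n k).length = n + 1 := by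
  simp [dpSpec]; omega

theorem dpSpec_getD (n k m : Nat) :
    (dpSpec n k).getD m 0 = if m ≤ k then fF m else 0 := by
  unfold dpSpec
  by_cases h : m ≤ k
  · rw [List.getD_eq_getElem?_getD, List.getElem?_append_left (by simp; omega)]
    simp [h]
  · rw [List.getD_eq_getElem?_getD, List.getElem?_append_right (by simp; omega)]
    rw [if_neg h]
    simp only [List.getElem?_replicate, List.length_map, List.length_range]
    split <;> simp

theorem dpSpec_set (n k : Nat) (hk : k < n) :
    (dpSpec n k).set (k+1) (fF (k+1)) = dpSpec n (k+1) := by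
  apply List.ext_getElem
  · rw [List.length_set, dpSpec_length n k (by omega), dpSpec_length n (k+1) (by omega)]
  · intro m h1 h2
    have hlk : m < (dpSpec n k).length := by
      rw [List.length_set] at h1; exact h1
    rw [List.getElem_set, ← List.getD_eq_getElem _ 0 h2, dpSpec_getD]
    by_cases he : k + 1 = m
    · subst he; simp
    · rw [if_neg he, ← List.getD_eq_getElem _ 0 hlk, dpSpec_getD]
      by_cases hm : m ≤ k
      · simp [hm, show m ≤ k+1 by omega]
      · simp [hm, show ¬ m ≤ k+1 by omega]

-- chained-mod prefix sum of fF over range(0, t) equals fF (t+2)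
theorem chain_eq (t : Nat) :
    (PySem.List.pyRange 0 (t : Int) 1).foldl
      (fun acc j => PySem.Int.mod (acc + fF j.toNat) (10^9 + 7)) 0 = fF (t+2) := by
  induction t with
  | zero => simp [PySem.List.pyRange_one_eq_nil (by omega : (0:Int) ≤ 0), fF]
  | succ t ih =>
    have hc : ((t+1 : Nat) : Int) = (t : Int) + 1 := by push_cast; ring
    rw [hc, PySem.List.pyRange_one_succ_right (by positivity), List.foldl_append, ih,
      show t+1+2 = t+3 from rfl, fF_succ3]
    simp

-- the inner j-loop of A sets index i to the chained-mod sum, reading the original dp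
theorem innerAL (M : Int) (l : List Int) : ∀ (dp : List Int) (N : Nat),
    N < dp.length → (∀ j ∈ l, 0 ≤ j ∧ j < (N:Int)) →
    l.foldl (stepAL M (N:Int)) dp =
      dp.set N (l.foldl (fun acc j => PySem.Int.mod (acc + dp.getD j.toNat 0) M)
        (dp.getD N 0)) := by
  induction l with
  | nil =>
    intro dp N hlen _
    rw [List.foldl_nil, List.foldl_nil, List.getD_eq_getElem _ 0 hlen, List.set_getElem_self]
  | cons j rest ih =>
    intro dp N hlen hmem
    obtain ⟨hj0, hji⟩ := hmem j List.mem_cons_self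
    have hjN : j.toNat ≠ N := by omega
    rw [List.foldl_cons, List.foldl_cons]
    have hstep : stepAL M (N:Int) dp j =
        dp.set N (PySem.Int.mod (dp.getD N 0 + dp.getD j.toNat 0) M) := by
      dsimp only [stepAL]
      rw [Int.toNat_natCast, getD_set_self dp N _ hlen, List.set_set]
    rw [hstep]
    have hlen' : N < (dp.set N (PySem.Int.mod (dp.getD N 0 + dp.getD j.toNat 0) M)).length := by
      rw [List.length_set]; exact hlen
    rw [ih _ N hlen' (fun x hx => hmem x (List.mem_cons_of_mem _ hx)), List.set_set,
      getD_set_self dp N _ hlen]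
    congr 1
    apply PySem.List.foldl_congr_mem
    intro acc x hx
    obtain ⟨hx0, hxi⟩ := hmem x (List.mem_cons_of_mem _ hx)
    rw [getD_set_ne dp N x.toNat _ (by omega)]

-- one outer step of A: from dpSpec n k to dpSpec n (k+1)
theorem outer_stepA (n k : Nat) (hk : k < n) :
    (PySem.List.pyRange 0 (((k:Int)+1) - 3 + 1) 1).foldl (stepAL (10^9+7) ((k:Int)+1)) (dpSpec n k)
      = dpSpec n (k+1) := by
  rw [show ((k:Int)+1) = ((k+1:Nat):Int) by push_cast; ring]
  have hlen : k + 1 < (dpSpec n k).length := by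
    rw [dpSpec_length n k (by omega)]; omega
  rw [innerAL (10^9+7) _ (dpSpec n k) (k+1) hlen
      (fun j hj => by rw [PySem.List.mem_pyRange_one] at hj; constructor <;> omega)]
  have hstart : (dpSpec n k).getD (k+1) 0 = 0 := by
    rw [dpSpec_getD]; simp
  have hcongr : (PySem.List.pyRange 0 (((k+1:Nat):Int) - 3 + 1) 1).foldl
      (fun acc j => PySem.Int.mod (acc + (dpSpec n k).getD j.toNat 0) (10^9+7)) 0 =
      (PySem.List.pyRange 0 (((k+1:Nat):Int) - 3 + 1) 1).foldl
      (fun acc j => PySem.Int.mod (acc + fF j.toNat) (10^9+7)) 0 := by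
    apply PySem.List.foldl_congr_mem
    intro acc x hx
    rw [PySem.List.mem_pyRange_one] at hx
    rw [dpSpec_getD, if_pos (by omega)]
  have hchain : (PySem.List.pyRange 0 (((k+1:Nat):Int) - 3 + 1) 1).foldl
      (fun acc j => PySem.Int.mod (acc + fF j.toNat) (10^9+7)) 0 = fF (k+1) := by
    rcases k with _ | _ | m
    · rw [PySem.List.pyRange_one_eq_nil (by norm_num)]; rfl
    · rw [PySem.List.pyRange_one_eq_nil (by norm_num)]; rfl
    · rw [show (((m+2+1 : Nat)):Int) - 3 + 1 = ((m+1 : Nat) : Int) by push_cast; ring,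
        chain_eq (m+1)]
  rw [hstart, hcongr, hchain, dpSpec_set n k hk]

-- A's outer loop
theorem outerA (n : Nat) : ∀ k, k ≤ n →
    (PySem.List.pyRange 1 ((k:Int)+1) 1).foldl
      (fun dp i => (PySem.List.pyRange 0 (i-3+1) 1).foldl (stepAL (10^9+7) i) dp) (dpSpec n 0)
      = dpSpec n k := by
  intro k
  induction k with
  | zero => intro _; rw [PySem.List.pyRange_one_eq_nil (by omega)]; rfl
  | succ k ih =>
    intro hk
    have h1 : (((k+1:Nat) : Int) + 1) = ((k:Int) + 1) + 1 := by push_cast; ring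
    rw [h1, PySem.List.pyRange_one_succ_right (by omega), List.foldl_append, ih (by omega),
      List.foldl_cons, List.foldl_nil]
    exact outer_stepA n k (by omega)

-- B's running value after step k
def rB (k : Nat) : Int := if k = 0 then 0 else fF k

theorem rB_eq_fF (k : Nat) (hk : 1 ≤ k) : rB k = fF k := by
  unfold rB; rw [if_neg (by omega)]

-- one outer step of B
theorem outer_stepB (n k : Nat) (hk : k < n) :
    stepBL (10^9+7) (dpSpec n k, rB k) ((k:Int)+1) = (dpSpec n (k+1), rB (k+1)) := by
  have hrun : (if 3 ≤ (k:Int)+1 then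
      PySem.Int.mod (rB k + (dpSpec n k).getD (((k:Int)+1-3).toNat) 0) (10^9+7)
    else rB k) = fF (k+1) := by
    rcases k with _ | _ | m
    · norm_num [rB]; rfl
    · norm_num [rB]; rfl
    · rw [if_pos (by push_cast; omega),
        show (((m+2 : Nat):Int)+1-3).toNat = m by omega,
        dpSpec_getD, if_pos (by omega),
        rB_eq_fF _ (by omega), show (m+2)+1 = m+3 from rfl, fF_succ3]
  dsimp only [stepBL]
  rw [hrun, rB_eq_fF (k+1) (by omega),
    show (((k:Int)+1)).toNat = k+1 by omega, dpSpec_set n k hk]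

-- B's outer loop
theorem outerB (n : Nat) : ∀ k, k ≤ n →
    (PySem.List.pyRange 1 ((k:Int)+1) 1).foldl (stepBL (10^9+7)) (dpSpec n 0, 0)
      = (dpSpec n k, rB k) := by
  intro k
  induction k with
  | zero => intro _; rw [PySem.List.pyRange_one_eq_nil (by omega)]; rfl
  | succ k ih =>
    intro hk
    have h1 : (((k+1:Nat) : Int) + 1) = ((k:Int) + 1) + 1 := by push_cast; ring
    rw [h1, PySem.List.pyRange_one_succ_right (by omega), List.foldl_append, ih (by omega),
      List.foldl_cons, List.foldl_nil]
    exact outer_stepB n k (by omega)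

theorem dp0_eq (n : Nat) :
    ((Array.replicate (n+1) (0:Int)).setIfInBounds 0 1).toList = dpSpec n 0 := by
  rw [Array.toList_setIfInBounds]
  simp [dpSpec, List.replicate_succ, fF]

theorem solve_eq_fF (n : Nat) : solve (n : Int) = fF n := by
  show ((PySem.List.pyRange 1 ((n:Int)+1) 1).foldl
      (fun dp i => (PySem.List.pyRange 0 (i-3+1) 1).foldl (stepA (10^9+7) i) dp)
      ((Array.replicate ((n:Int)+1).toNat (0:Int)).setIfInBounds 0 1)).getD (n:Int).toNat 0 = fF n
  rw [agetD]
  have hfold : ∀ (arr : Array Int) (l : List Int),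
      (l.foldl (fun dp i => (PySem.List.pyRange 0 (i-3+1) 1).foldl (stepA (10^9+7) i) dp) arr).toList
        = l.foldl (fun dp i => (PySem.List.pyRange 0 (i-3+1) 1).foldl (stepAL (10^9+7) i) dp) arr.toList := by
    intro arr l
    induction l generalizing arr with
    | nil => rfl
    | cons x xs ih => rw [List.foldl_cons, List.foldl_cons, ih, foldA_toList]
  rw [hfold, show ((n:Int)+1).toNat = n+1 by omega, dp0_eq n, outerA n n (le_refl n),
    Int.toNat_natCast, dpSpec_getD]
  simp

theorem solve_alt_eq_fF (n : Nat) : solve_alt (n : Int) = fF n := by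
  show ((PySem.List.pyRange 1 ((n:Int)+1) 1).foldl (stepB (10^9+7))
      ((Array.replicate ((n:Int)+1).toNat (0:Int)).setIfInBounds 0 1, 0)).1.getD (n:Int).toNat 0 = fF n
  rw [agetD, show ((n:Int)+1).toNat = n+1 by omega]
  have h := foldB_toList (PySem.List.pyRange 1 ((n:Int)+1) 1) (10^9+7)
    ((Array.replicate (n+1) (0:Int)).setIfInBounds 0 1, 0)
  rw [show ((Array.replicate (n+1) (0:Int)).setIfInBounds 0 1, (0:Int)).1
      = (Array.replicate (n+1) (0:Int)).setIfInBounds 0 1 from rfl,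
    show ((Array.replicate (n+1) (0:Int)).setIfInBounds 0 1, (0:Int)).2 = (0:Int) from rfl,
    dp0_eq n, outerB n n (le_refl n)] at h
  have h1 := (Prod.ext_iff.mp h).1
  dsimp only at h1
  rw [h1, Int.toNat_natCast, dpSpec_getD]
  simp

-- ===== VERDICT (by name: the statement is the Claim_ definition above) =====
theorem solve_spec : Claim_equal_solve := by
  intro s _ hpre
  unfold Spec_solve
  lift s to Nat using hpre with n
  rw [solve_eq_fF, solve_alt_eq_fF]
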